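-- pv_equiv track=rewrite | github.com/doctorMcbob/LURD2 | src/level_builder/builder.py | fresh_floor
-- ===== SOURCE A (Python) =====
-- def fresh_floor(W, H, ent=False, ext=False):
--     floor = []
--     for y in range(H):
--         floor.append([])
--         for x in range(W):
--             floor[-1].append([])
--             if (x, y) == ent: floor[-1][-1].append("downstairs")
--             elif (x, y) == ext: floor[-1][-1].append("upstairs")
--     return floor
-- ===== SOURCE B (Python) =====
-- def fresh_floor(W, H, ent=False, ext=False):
--     # Build the blank grid directly, then place markers by direct index.
--     floor = [[[] for _ in range(W)] for _ in range(H)]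
--     if isinstance(ent, tuple) and 0 <= ent[0] < W and 0 <= ent[1] < H:
--         floor[ent[1]][ent[0]].append("downstairs")
--     if isinstance(ext, tuple) and 0 <= ext[0] < W and 0 <= ext[1] < H and ext != ent:
--         floor[ext[1]][ext[0]].append("upstairs")
--     return floor
-- ===== Notes on version B (the rewrite author's own statement) =====
-- stated objective: alternative
-- what changed: B builds the blank W×H grid with a nested comprehension and places the two markers by direct indexed writes (with bounds checks and ext != ent to honor the elif precedence), instead of comparing every cell against ent and ext inside the per-cell loop.
import Mathlib
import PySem

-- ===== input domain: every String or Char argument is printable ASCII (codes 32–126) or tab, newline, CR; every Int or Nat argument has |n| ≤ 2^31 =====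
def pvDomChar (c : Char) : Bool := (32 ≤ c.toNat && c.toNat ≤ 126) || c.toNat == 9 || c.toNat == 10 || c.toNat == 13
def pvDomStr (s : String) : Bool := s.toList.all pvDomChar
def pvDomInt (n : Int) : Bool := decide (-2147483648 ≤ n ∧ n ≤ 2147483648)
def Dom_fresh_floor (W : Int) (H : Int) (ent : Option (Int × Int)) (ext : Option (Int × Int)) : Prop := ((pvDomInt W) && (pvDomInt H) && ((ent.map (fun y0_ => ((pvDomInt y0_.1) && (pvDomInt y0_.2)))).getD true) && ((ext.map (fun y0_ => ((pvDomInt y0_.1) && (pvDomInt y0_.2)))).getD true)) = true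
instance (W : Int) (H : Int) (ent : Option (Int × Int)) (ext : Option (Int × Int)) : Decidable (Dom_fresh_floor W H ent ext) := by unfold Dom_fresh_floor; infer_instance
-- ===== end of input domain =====

-- B builds the blank grid with a nested comprehension and places the two markers by
-- direct indexed writes instead of testing every cell against ent/ext in the loop.

-- ===== PORT A =====
-- literal port: outer loop appends a fresh row, inner loop appends a fresh cell,
-- then conditionally appends the marker to the just-appended cell (floor[-1][-1]).
def fresh_floor (W : Int) (H : Int) (ent : Option (Int × Int)) (ext : Option (Int × Int)) : List (List (List String)) :=
  (PySem.List.pyRange 0 H 1).foldl (fun floor y =>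
    floor ++ [(PySem.List.pyRange 0 W 1).foldl (fun row x =>
      row ++ [if some (x, y) = ent then ([] : List String) ++ ["downstairs"]
              else if some (x, y) = ext then ([] : List String) ++ ["upstairs"]
              else ([] : List String)]) []]) []

-- ===== PORT B =====
-- floor = [[[] for _ in range(W)] for _ in range(H)]
def pvBlank (W H : Int) : List (List (List String)) :=
  (List.range H.toNat).map (fun _ => (List.range W.toNat).map (fun _ => ([] : List String)))

-- floor[p[1]][p[0]].append(lab)
def pvPlace (g : List (List (List String))) (p : Int × Int) (lab : String) : List (List (List String)) :=
  g.modify p.2.toNat (fun row => row.modify p.1.toNat (fun cell => cell ++ [lab]))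

-- 0 <= p[0] < W and 0 <= p[1] < H
def pvInBounds (W H : Int) (p : Int × Int) : Bool :=
  decide (0 ≤ p.1) && decide (p.1 < W) && decide (0 ≤ p.2) && decide (p.2 < H)

-- 'if isinstance(pos, tuple) and <bounds> and <guard>: place(lab)'
def pvMark (W H : Int) (pos : Option (Int × Int)) (guard : Bool) (lab : String)
    (g : List (List (List String))) : List (List (List String)) :=
  match pos with
  | some p => if pvInBounds W H p && guard then pvPlace g p lab else g
  | none => g

def fresh_floor_alt (W : Int) (H : Int) (ent : Option (Int × Int)) (ext : Option (Int × Int)) : List (List (List String)) :=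
  pvMark W H ext (decide (ext ≠ ent)) "upstairs"
    (pvMark W H ent true "downstairs" (pvBlank W H))

-- ===== PRECONDITION & SPEC =====
def Spec_fresh_floor (W : Int) (H : Int) (ent : Option (Int × Int)) (ext : Option (Int × Int)) (out : List (List (List String))) : Prop := out = fresh_floor_alt W H ent ext
instance (W : Int) (H : Int) (ent : Option (Int × Int)) (ext : Option (Int × Int)) (out : List (List (List String))) : Decidable (Spec_fresh_floor W H ent ext out) := by unfold Spec_fresh_floor; infer_instance

-- ===== CLAIM (what is proved, stated in full; the proofs are below) =====
def Claim_equal_fresh_floor : Prop := ∀ (W : Int) (H : Int) (ent : Option (Int × Int)) (ext : Option (Int × Int)), Dom_fresh_floor W H ent ext → Spec_fresh_floor W H ent ext (fresh_floor W H ent ext)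

-- ===== LEMMAS AND PROOFS =====

-- the per-cell value both programs put at column x, row y
def pvCell (ent ext : Option (Int × Int)) (x y : Int) : List String :=
  if some (x, y) = ent then ["downstairs"]
  else if some (x, y) = ext then ["upstairs"]
  else []

theorem fresh_floor_eq_map (W H : Int) (ent ext : Option (Int × Int)) :
    fresh_floor W H ent ext =
      (List.range H.toNat).map (fun (j : Nat) =>
        (List.range W.toNat).map (fun (i : Nat) => pvCell ent ext (i : Int) (j : Int))) := by
  unfold fresh_floor
  simp only [PySem.List.foldl_append_singleton_eq_map, List.nil_append]
  rw [PySem.List.pyRange_one, PySem.List.pyRange_one]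
  simp only [Int.sub_zero, List.map_map, Function.comp_def, zero_add, pvCell]

theorem modify_map_range {α : Type} (n k : Nat) (f : Nat → α) (g : α → α) :
    ((List.range n).map f).modify k g
      = (List.range n).map (fun j => if j = k then g (f j) else f j) := by
  apply List.ext_getElem
  · simp
  · intro j h1 h2
    simp only [List.getElem_modify, List.getElem_map, List.getElem_range]
    split_ifs with h3 h4 h4 <;> first | rfl | omega

theorem map_range_congr {α : Type} (n : Nat) (f g : Nat → α) (h : ∀ j, j < n → f j = g j) :
    (List.range n).map f = (List.range n).map g := by
  apply List.map_congr_left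
  intro j hj
  exact h j (List.mem_range.mp hj)

theorem inb_iff (W H : Int) (p : Int × Int) :
    pvInBounds W H p = true ↔ (0 ≤ p.1 ∧ p.1 < W ∧ 0 ≤ p.2 ∧ p.2 < H) := by
  unfold pvInBounds
  simp [and_assoc]

theorem mark_map (W H : Int) (pos : Option (Int × Int)) (guard : Bool) (lab : String)
    (f : Nat → Nat → List String) :
    pvMark W H pos guard lab
        ((List.range H.toNat).map (fun (j : Nat) => (List.range W.toNat).map (fun (i : Nat) => f j i)))
      = (List.range H.toNat).map (fun (j : Nat) => (List.range W.toNat).map (fun (i : Nat) =>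
          if pos = some ((i : Int), (j : Int)) ∧ pvInBounds W H ((i : Int), (j : Int)) = true ∧ guard = true
          then f j i ++ [lab] else f j i)) := by
  cases pos with
  | none =>
    simp only [pvMark]
    apply map_range_congr; intro j hj
    apply map_range_congr; intro i hi
    rw [if_neg (by simp)]
  | some p =>
    simp only [pvMark]
    by_cases h : (pvInBounds W H p && guard) = true
    · rw [if_pos h]
      simp only [Bool.and_eq_true] at h
      have hb := (inb_iff W H p).mp h.1
      unfold pvPlace
      rw [modify_map_range]
      apply map_range_congr; intro j hj
      by_cases hj2 : j = p.2.toNat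
      · subst hj2
        rw [if_pos rfl, modify_map_range]
        apply map_range_congr; intro i hi
        by_cases hi1 : i = p.1.toNat
        · subst hi1
          have hp : p = ((p.1.toNat : Int), (p.2.toNat : Int)) := by
            rw [Prod.ext_iff]; constructor <;> simp <;> omega
          rw [if_pos rfl, if_pos ⟨by rw [← hp], by rw [← hp]; exact ⟨h.1, h.2⟩⟩]
        · rw [if_neg hi1, if_neg (by rintro ⟨a, -⟩; simp only [Option.some.injEq, Prod.ext_iff] at a; omega)]
      · rw [if_neg hj2]
        apply map_range_congr; intro i hi
        rw [if_neg (by rintro ⟨a, -⟩; simp only [Option.some.injEq, Prod.ext_iff] at a; omega)]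
    · rw [if_neg h]
      apply map_range_congr; intro j hj
      apply map_range_congr; intro i hi
      rw [if_neg (by rintro ⟨a, b, c⟩; simp only [Option.some.injEq] at a; subst a; rw [b, c] at h; exact h rfl)]

theorem alt_eq_map (W H : Int) (ent ext : Option (Int × Int)) :
    fresh_floor_alt W H ent ext =
      (List.range H.toNat).map (fun (j : Nat) =>
        (List.range W.toNat).map (fun (i : Nat) => pvCell ent ext (i : Int) (j : Int))) := by
  unfold fresh_floor_alt pvBlank
  rw [mark_map W H ent true "downstairs" (fun _ _ => ([] : List String)),
      mark_map W H ext (decide (ext ≠ ent)) "upstairs"]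
  apply map_range_congr; intro j hj
  apply map_range_congr; intro i hi
  have hinb : pvInBounds W H ((i : Int), (j : Int)) = true := by
    rw [inb_iff]; constructor <;> simp <;> omega
  by_cases he : some ((i : Int), (j : Int)) = ent
  · by_cases hx : some ((i : Int), (j : Int)) = ext
    · simp [pvCell, ← he, ← hx, hinb]
    · simp [pvCell, ← he, hinb, Ne.symm hx]
  · by_cases hx : some ((i : Int), (j : Int)) = ext
    · simp [pvCell, ← hx, hinb, Ne.symm he, he]
    · simp [pvCell, he, hx, Ne.symm he, Ne.symm hx]

-- ===== VERDICT (by name: the statement is the Claim_ definition above) =====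
theorem fresh_floor_spec : Claim_equal_fresh_floor := by
  intro W H ent ext _
  unfold Spec_fresh_floor
  rw [fresh_floor_eq_map, alt_eq_map]
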